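-- pv_equiv track=rewrite | github.com/yhzhang95/LeetCodeDaily | No_1023.py | singleMatch
-- ===== SOURCE A (Python) =====
-- def singleMatch(query: str, pattern: str) -> bool:
--
--     pidx, pmax = 0, len(pattern)
--     for char in query:
--         if pidx != pmax:
--             if char == pattern[pidx]:
--                 pidx += 1
--                 continue
--
--         if char.isupper():
--             break
--     else:
--         if pidx == pmax:
--             return True
--     return False
-- ===== SOURCE B (Python) =====
-- def _segments(s):
--     segs = []
--     cur = []
--     for ch in s:
--         if ch.isupper():
--             segs.append(''.join(cur))
--             cur = [ch]
--         else:
--             cur.append(ch)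
--     segs.append(''.join(cur))
--     return segs
--
--
-- def _subseq(q, p):
--     i = 0
--     for ch in q:
--         if i < len(p) and ch == p[i]:
--             i += 1
--     return i == len(p)
--
--
-- def singleMatch(query: str, pattern: str) -> bool:
--     qsegs = _segments(query)
--     psegs = _segments(pattern)
--     if len(qsegs) != len(psegs):
--         return False
--     return all(_subseq(q, p) for q, p in zip(qsegs, psegs))
-- ===== Notes on version B (the rewrite author's own statement) =====
-- stated objective: alternative
-- what changed: Replaces A's single greedy scan of query with a pattern index by splitting both query and pattern into camel-case segments (new segment at each uppercase letter) and checking each aligned pattern segment as a subsequence of its query segment with a small two-pointer loop.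
import Mathlib
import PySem

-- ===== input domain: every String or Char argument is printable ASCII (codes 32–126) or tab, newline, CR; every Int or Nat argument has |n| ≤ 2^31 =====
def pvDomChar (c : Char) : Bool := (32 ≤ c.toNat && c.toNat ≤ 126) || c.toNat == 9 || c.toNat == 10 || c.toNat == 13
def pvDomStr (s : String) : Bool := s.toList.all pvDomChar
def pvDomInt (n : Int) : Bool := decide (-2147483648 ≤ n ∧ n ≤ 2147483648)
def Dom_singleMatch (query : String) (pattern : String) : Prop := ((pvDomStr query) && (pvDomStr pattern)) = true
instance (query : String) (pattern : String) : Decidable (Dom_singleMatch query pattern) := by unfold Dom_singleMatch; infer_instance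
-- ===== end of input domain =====

-- B re-decomposes A's single greedy scan into camel-case segments checked pairwise
-- (a different decomposition, same asymptotic cost); the return values are proved equal.

-- ===== PORT A =====
-- A's for-loop over query with pattern index pidx; for-else/break becomes the Bool result.
def singleMatchLoopA (pattern : List Char) (pmax : Nat) : List Char → Nat → Bool
  | [], pidx => decide (pidx = pmax)          -- for-else: no break; "return pidx == pmax"
  | char :: rest, pidx =>
    if pidx ≠ pmax ∧ PySem.List.pyGet? pattern (pidx : Int) = some char then
      singleMatchLoopA pattern pmax rest (pidx + 1)      -- pidx += 1; continue
    else if PySem.Chars.isupper char then false          -- break → return False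
    else singleMatchLoopA pattern pmax rest pidx

def singleMatch (query : String) (pattern : String) : Bool :=
  singleMatchLoopA pattern.toList pattern.toList.length query.toList 0

-- ===== PORT B =====
-- B's _segments: left fold over the string carrying (finished segments, current segment).
def segLoopB : List Char → List (List Char) → List Char → List (List Char)
  | [], segs, cur => segs ++ [cur]
  | ch :: rest, segs, cur =>
    if PySem.Chars.isupper ch then segLoopB rest (segs ++ [cur]) [ch]
    else segLoopB rest segs (cur ++ [ch])

-- B's _subseq: two-pointer scan of the query segment, index i into the pattern segment.
def subLoopB (p : List Char) : List Char → Nat → Bool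
  | [], i => decide (i = p.length)
  | ch :: rest, i =>
    if i < p.length ∧ PySem.List.pyGet? p (i : Int) = some ch then subLoopB p rest (i + 1)
    else subLoopB p rest i

def singleMatch_alt (query : String) (pattern : String) : Bool :=
  let qsegs := segLoopB query.toList [] []
  let psegs := segLoopB pattern.toList [] []
  if qsegs.length ≠ psegs.length then false
  else (qsegs.zip psegs).all (fun qp => subLoopB qp.2 qp.1 0)

-- ===== PRECONDITION & SPEC =====
def Spec_singleMatch (query : String) (pattern : String) (out : Bool) : Prop := out = singleMatch_alt query pattern
instance (query : String) (pattern : String) (out : Bool) : Decidable (Spec_singleMatch query pattern out) := by unfold Spec_singleMatch; infer_instance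

-- ===== CLAIM (what is proved, stated in full; the proofs are below) =====
def Claim_equal_singleMatch : Prop := ∀ (query : String) (pattern : String), Dom_singleMatch query pattern → Spec_singleMatch query pattern (singleMatch query pattern)

-- ===== LEMMAS AND PROOFS =====

-- Suffix-style reformulation of A's loop: remaining query vs remaining pattern.
def gAB : List Char → List Char → Bool
  | [], ps => ps.isEmpty
  | c :: rest, [] => if PySem.Chars.isupper c then false else gAB rest []
  | c :: rest, a :: ps =>
    if a = c then gAB rest ps
    else if PySem.Chars.isupper c then false
    else gAB rest (a :: ps)

-- Suffix-style reformulation of B's _subseq.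
def ssB : List Char → List Char → Bool
  | [], ps => ps.isEmpty
  | _ :: rest, [] => ssB rest []
  | c :: rest, a :: ps => if a = c then ssB rest ps else ssB rest (a :: ps)

-- Recursive characterization of B's segments: (leading segment, remaining segments).
def segsR : List Char → List Char × List (List Char)
  | [] => ([], [])
  | c :: rest =>
    let r := segsR rest
    if PySem.Chars.isupper c then ([], (c :: r.1) :: r.2) else (c :: r.1, r.2)

-- Pairwise segment check: equal length and ssB on each aligned pair.
def chkB : List (List Char) → List (List Char) → Bool
  | [], [] => true
  | q :: qs, p :: ps => ssB q p && chkB qs ps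
  | _, _ => false

lemma ssB_nil : ∀ q : List Char, ssB q [] = true := by
  intro q; induction q with
  | nil => rfl
  | cons c rest ih => simpa [ssB] using ih

lemma ssB_not_mem : ∀ (q : List Char) (a : Char) (t : List Char), a ∉ q → ssB q (a :: t) = false := by
  intro q; induction q with
  | nil => intro a t _; rfl
  | cons c rest ih =>
    intro a t h
    have hac : ¬ a = c := by simp at h; tauto
    have hmem : a ∉ rest := by simp at h; tauto
    simp [ssB, hac, ih a t hmem]

lemma segsR_fst_not_upper : ∀ (q : List Char) (c : Char), c ∈ (segsR q).1 → PySem.Chars.isupper c = false := by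
  intro q; induction q with
  | nil => intro c h; simp [segsR] at h
  | cons d rest ih =>
    intro c h
    by_cases hu : PySem.Chars.isupper d
    · simp [segsR, hu] at h
    · simp [segsR, hu] at h
      rcases h with h | h
      · subst h; simpa using hu
      · exact ih c h

-- A's indexed loop equals the suffix-style gAB.
lemma loopA_eq_gAB (p : List Char) :
    ∀ (q : List Char) (pidx : Nat), pidx ≤ p.length →
      singleMatchLoopA p p.length q pidx = gAB q (p.drop pidx) := by
  intro q; induction q with
  | nil =>
    intro pidx h
    by_cases hpe : pidx = p.length
    · simp [singleMatchLoopA, gAB, hpe]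
    · have hlt : pidx < p.length := lt_of_le_of_ne h hpe
      have hd : p.drop pidx = p[pidx] :: p.drop (pidx + 1) := List.drop_eq_getElem_cons hlt
      rw [singleMatchLoopA, hd, gAB]
      simp [hpe]
      omega
  | cons c rest ih =>
    intro pidx h
    rcases Nat.lt_or_ge pidx p.length with hlt | hge
    · have hdrop : p.drop pidx = p[pidx] :: p.drop (pidx + 1) := List.drop_eq_getElem_cons hlt
      have hget : PySem.List.pyGet? p (pidx : Int) = some p[pidx] := by
        simp [PySem.List.pyGet?_natCast, List.getElem?_eq_getElem hlt]
      have hne' : pidx ≠ p.length := Nat.ne_of_lt hlt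
      by_cases hc : p[pidx] = c
      · rw [singleMatchLoopA, if_pos ⟨hne', by rw [hget, hc]⟩, hdrop, gAB, if_pos hc,
            ih (pidx + 1) (by omega)]
      · have hcond : ¬ (pidx ≠ p.length ∧ PySem.List.pyGet? p (pidx : Int) = some c) := by
          rw [hget]; intro ⟨_, hs⟩; exact hc (Option.some.injEq _ _ ▸ hs)
        rw [singleMatchLoopA, if_neg hcond, hdrop, gAB, if_neg hc]
        by_cases hu : PySem.Chars.isupper c
        · simp [hu]
        · simp only [hu, if_false, Bool.false_eq_true]
          rw [ih pidx h, hdrop]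
    · have hpe : pidx = p.length := by omega
      have hdrop : p.drop pidx = [] := by simp [hpe]
      have hcond : ¬ (pidx ≠ p.length ∧ PySem.List.pyGet? p (pidx : Int) = some c) := by
        intro ⟨h1, _⟩; exact h1 hpe
      rw [singleMatchLoopA, if_neg hcond, hdrop, gAB]
      by_cases hu : PySem.Chars.isupper c
      · simp [hu]
      · simp only [hu, if_false, Bool.false_eq_true]
        rw [ih pidx h, hdrop]

-- B's indexed _subseq loop equals the suffix-style ssB.
lemma subLoopB_eq_ssB (p : List Char) :
    ∀ (q : List Char) (i : Nat), i ≤ p.length → subLoopB p q i = ssB q (p.drop i) := by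
  intro q; induction q with
  | nil =>
    intro i h
    by_cases hpe : i = p.length
    · simp [subLoopB, ssB, hpe]
    · have hlt : i < p.length := lt_of_le_of_ne h hpe
      have hd : p.drop i = p[i] :: p.drop (i + 1) := List.drop_eq_getElem_cons hlt
      rw [subLoopB, hd, ssB]
      simp [hpe]
      omega
  | cons c rest ih =>
    intro i h
    rcases Nat.lt_or_ge i p.length with hlt | hge
    · have hdrop : p.drop i = p[i] :: p.drop (i + 1) := List.drop_eq_getElem_cons hlt
      have hget : PySem.List.pyGet? p (i : Int) = some p[i] := by
        simp [PySem.List.pyGet?_natCast, List.getElem?_eq_getElem hlt]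
      by_cases hc : p[i] = c
      · rw [subLoopB, if_pos ⟨hlt, by rw [hget, hc]⟩, hdrop, ssB, if_pos hc,
            ih (i + 1) (by omega)]
      · have hcond : ¬ (i < p.length ∧ PySem.List.pyGet? p (i : Int) = some c) := by
          rw [hget]; intro ⟨_, hs⟩; exact hc (Option.some.injEq _ _ ▸ hs)
        rw [subLoopB, if_neg hcond, hdrop, ssB, if_neg hc, ih i h, hdrop]
    · have hpe : i = p.length := by omega
      have hdrop : p.drop i = [] := by simp [hpe]
      have hcond : ¬ (i < p.length ∧ PySem.List.pyGet? p (i : Int) = some c) := by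
        intro ⟨h1, _⟩; omega
      rw [subLoopB, if_neg hcond, hdrop, ssB, ih i h, hdrop]

-- B's segment fold equals the recursive characterization.
lemma segLoopB_eq_segsR :
    ∀ (q : List Char) (segs : List (List Char)) (cur : List Char),
      segLoopB q segs cur = segs ++ (cur ++ (segsR q).1) :: (segsR q).2 := by
  intro q; induction q with
  | nil => intro segs cur; simp [segLoopB, segsR]
  | cons c rest ih =>
    intro segs cur
    by_cases hu : PySem.Chars.isupper c
    · simp [segLoopB, segsR, hu, ih]
    · simp [segLoopB, segsR, hu, ih]

lemma chkB_length : ∀ qs ps : List (List Char), chkB qs ps = true → qs.length = ps.length := by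
  intro qs; induction qs with
  | nil => intro ps h; cases ps with
    | nil => rfl
    | cons p ps => simp [chkB] at h
  | cons q qs ih =>
    intro ps h
    cases ps with
    | nil => simp [chkB] at h
    | cons p ps =>
      simp [chkB] at h
      simp [ih ps h.2]

-- The length-check-plus-zip form of B equals chkB.
lemma zip_all_eq_chkB :
    ∀ qs ps : List (List Char),
      (if qs.length ≠ ps.length then false
       else (qs.zip ps).all (fun qp => ssB qp.1 qp.2)) = chkB qs ps := by
  intro qs; induction qs with
  | nil => intro ps; cases ps <;> simp [chkB]
  | cons q qs ih =>
    intro ps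
    cases ps with
    | nil => simp [chkB]
    | cons p ps =>
      by_cases hl : qs.length = ps.length
      · rw [if_neg (by simp [hl])]
        have hih := ih ps
        rw [if_neg (by simp [hl])] at hih
        simp [chkB, ← hih]
      · have hf : chkB qs ps = false := by
          cases hcc : chkB qs ps with
          | false => rfl
          | true => exact absurd (chkB_length qs ps hcc) hl
        rw [if_pos (by simp [hl])]
        simp [chkB, hf]

-- Main equivalence: A's greedy scan equals the pairwise segment check.
lemma gAB_eq_chk :
    ∀ q ps : List Char,
      gAB q ps = chkB ((segsR q).1 :: (segsR q).2) ((segsR ps).1 :: (segsR ps).2) := by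
  intro q; induction q with
  | nil =>
    intro ps
    cases ps with
    | nil => simp [gAB, segsR, chkB, ssB]
    | cons a ps' =>
      by_cases hu : PySem.Chars.isupper a
      · simp [gAB, segsR, hu, chkB, ssB]
      · simp [gAB, segsR, hu, chkB, ssB]
  | cons c q' ih =>
    intro ps
    by_cases hu : PySem.Chars.isupper c
    · cases ps with
      | nil => simp [gAB, segsR, hu, chkB, ssB]
      | cons a ps' =>
        by_cases hac : a = c
        · subst hac
          simp [gAB, segsR, hu, chkB, ssB]
          have := ih ps'
          simp [chkB] at this
          simpa using this
        · by_cases hua : PySem.Chars.isupper a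
          · have hnm : a ∉ c :: (segsR q').1 := by
              intro hm
              rcases List.mem_cons.mp hm with h | h
              · exact hac h
              · have := segsR_fst_not_upper q' a h
                rw [this] at hua; exact Bool.false_ne_true hua
            simp [gAB, segsR, hu, hua, hac, chkB, ssB_not_mem _ _ _ hnm]
          · simp [gAB, segsR, hu, hua, hac, chkB, ssB]
    · cases ps with
      | nil =>
        have := ih []
        simp [segsR, chkB, ssB_nil] at this
        simp [gAB, segsR, hu, chkB, ssB_nil, this]
      | cons a ps' =>
        by_cases hac : a = c
        · subst hac
          simp [gAB, segsR, hu, chkB, ssB]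
          have := ih ps'
          simp [chkB] at this
          simpa using this
        · have := ih (a :: ps')
          by_cases hua : PySem.Chars.isupper a
          · simp [segsR, hua, chkB, ssB_nil] at this
            simp [gAB, segsR, hu, hua, hac, chkB, ssB_nil, this]
          · simp [segsR, hua, chkB] at this
            simp [gAB, segsR, hu, hua, hac, chkB, ssB, this]

-- ===== VERDICT (by name: the statement is the Claim_ definition above) =====
theorem singleMatch_spec : Claim_equal_singleMatch := by
  intro query pattern _
  unfold Spec_singleMatch singleMatch singleMatch_alt
  rw [loopA_eq_gAB pattern.toList query.toList 0 (Nat.zero_le _)]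
  simp only [List.drop_zero]
  rw [gAB_eq_chk]
  rw [segLoopB_eq_segsR, segLoopB_eq_segsR]
  simp only [List.nil_append]
  rw [← zip_all_eq_chkB]
  have hsub : ∀ (qp : List Char × List Char), subLoopB qp.2 qp.1 0 = ssB qp.1 qp.2 := by
    intro qp
    rw [subLoopB_eq_ssB qp.2 qp.1 0 (Nat.zero_le _)]
    simp
  simp [hsub]
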